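-- pv_equiv track=rewrite | github.com/Lightblues/Leetcode | contest/274.py | checkString
-- ===== SOURCE A (Python) =====
-- def checkString(s: str) -> bool:
--     hasB = False
--     for char in s:
--         if char == 'a' and hasB:
--             return False
--         elif char == 'b':
--             hasB = True
--     return True
-- ===== SOURCE B (Python) =====
-- def checkString(s: str) -> bool:
--     b_idx = s.find('b')
--     if b_idx == -1:
--         return True
--     return 'a' not in s[b_idx:]
-- ===== Notes on version B (the rewrite author's own statement) =====
-- stated objective: idiomatic
-- what changed: Replaced A's single manual flag-tracking loop by a locate-then-scan decomposition: find the index of the first 'b' with str.find, then return whether no 'a' occurs in the suffix from that index.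
import Mathlib
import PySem

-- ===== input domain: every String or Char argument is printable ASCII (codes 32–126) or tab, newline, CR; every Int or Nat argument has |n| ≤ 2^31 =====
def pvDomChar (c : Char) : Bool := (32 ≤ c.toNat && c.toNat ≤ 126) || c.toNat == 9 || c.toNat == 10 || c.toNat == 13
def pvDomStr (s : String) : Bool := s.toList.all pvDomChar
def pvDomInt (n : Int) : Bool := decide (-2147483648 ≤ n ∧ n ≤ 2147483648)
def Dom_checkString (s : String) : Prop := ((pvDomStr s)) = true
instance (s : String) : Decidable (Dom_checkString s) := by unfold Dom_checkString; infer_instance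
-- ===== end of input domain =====

-- B replaces A's manual flag-tracking loop by a locate-then-scan decomposition
-- (find the first 'b', then test 'a' ∉ suffix); objective: more idiomatic, same cost.

-- ===== PORT A =====
-- the loop of A: carries the hasB flag; returns false as soon as an 'a' is seen with hasB set
def checkGo : List Char → Bool → Bool
  | [], _ => true
  | c :: rest, hasB =>
    if c = 'a' && hasB then false
    else if c = 'b' then checkGo rest true
    else checkGo rest hasB

def checkString (s : String) : Bool := checkGo s.toList false

-- ===== PORT B =====
def checkString_alt (s : String) : Bool :=
  let bIdx := PySem.Str.find s "b"
  if bIdx = -1 then true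
  else !(PySem.Str.isIn "a" (PySem.Str.slice s (some bIdx) none))

-- ===== PRECONDITION & SPEC =====
def Spec_checkString (s : String) (out : Bool) : Prop := out = checkString_alt s
instance (s : String) (out : Bool) : Decidable (Spec_checkString s out) := by unfold Spec_checkString; infer_instance

-- ===== CLAIM (what is proved, stated in full; the proofs are below) =====
def Claim_equal_checkString : Prop := ∀ (s : String), Dom_checkString s → Spec_checkString s (checkString s)

-- ===== LEMMAS AND PROOFS =====

-- find returns n when n is the least index where sub is a prefix of the suffix
theorem find_eq_of_least (cs sub : List Char) (n : Nat)
    (h1 : sub <+: cs.drop n) (h2 : ∀ i < n, ¬ sub <+: cs.drop i) :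
    PySem.Chars.find cs sub = (n : Int) := by
  have hinf : sub <:+: cs := by
    have : sub <:+: cs.drop n := h1.isInfix
    exact this.trans (List.drop_suffix n cs).isInfix
  have hnn : 0 ≤ PySem.Chars.find cs sub := (PySem.Chars.find_nonneg_iff cs sub).mpr hinf
  obtain ⟨hp, hmin⟩ := PySem.Chars.find_spec hnn
  have heq : (PySem.Chars.find cs sub).toNat = n := by
    rcases Nat.lt_trichotomy (PySem.Chars.find cs sub).toNat n with h | h | h
    · exact absurd hp (h2 _ h)
    · exact h
    · exact absurd h1 (hmin _ h)
  omega

-- find of a singleton at a matching head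
theorem find_cons_self (t : Char) (cs : List Char) :
    PySem.Chars.find (t :: cs) [t] = 0 := by
  have := find_eq_of_least (t :: cs) [t] 0 (by simp) (by omega)
  simpa using this

-- find of a singleton past a non-matching head: absent stays absent
theorem find_cons_ne_none (c t : Char) (cs : List Char) (hne : c ≠ t)
    (hr : PySem.Chars.find cs [t] = -1) :
    PySem.Chars.find (c :: cs) [t] = -1 := by
  rw [PySem.Chars.find_eq_neg_one_iff] at hr ⊢
  rw [List.singleton_infix_iff] at hr ⊢
  simp [hne.symm, hr]

-- find of a singleton past a non-matching head: present shifts by one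
theorem find_cons_ne (c t : Char) (cs : List Char) (hne : c ≠ t)
    (hr : 0 ≤ PySem.Chars.find cs [t]) :
    PySem.Chars.find (c :: cs) [t] = PySem.Chars.find cs [t] + 1 := by
  obtain ⟨hp, hmin⟩ := PySem.Chars.find_spec hr
  have h := find_eq_of_least (c :: cs) [t] ((PySem.Chars.find cs [t]).toNat + 1)
    (by simpa using hp)
    (by
      intro i hi
      cases i with
      | zero => simp [hne.symm]
      | succ j => simpa using hmin j (by omega))
  omega

-- A's loop with the flag already set just scans for 'a'
theorem checkGo_true (cs : List Char) : checkGo cs true = !(cs.contains 'a') := by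
  induction cs with
  | nil => simp [checkGo]
  | cons c rest ih =>
    by_cases h : c = 'a'
    · simp [checkGo, h]
    · by_cases hb : c = 'b'
      · simp [checkGo, hb, ih]
      · simp only [checkGo, h, hb]
        simp [ih]
        exact fun _ h2 => h h2.symm

-- the main characterisation: A's loop equals B's locate-then-scan
theorem checkGo_eq_alt (cs : List Char) :
    checkGo cs false =
      (if PySem.Chars.find cs ['b'] = -1 then true
       else !((cs.drop (PySem.Chars.find cs ['b']).toNat).contains 'a')) := by
  induction cs with
  | nil =>
    have : PySem.Chars.find ([] : List Char) ['b'] = -1 := by decide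
    simp [checkGo, this]
  | cons c rest ih =>
    by_cases hb : c = 'b'
    · subst hb
      have hf := find_cons_self 'b' rest
      have hgo : checkGo ('b' :: rest) false = checkGo rest true := by
        simp [checkGo]
      rw [hgo, checkGo_true, hf]
      simp
    · have hgo : checkGo (c :: rest) false = checkGo rest false := by
        by_cases ha : c = 'a' <;> simp [checkGo, ha, hb]
      by_cases hneg : PySem.Chars.find rest ['b'] = -1
      case neg =>
        have hr : 0 ≤ PySem.Chars.find rest ['b'] := by
          have := PySem.Chars.neg_one_le_find rest ['b']; omega
        have hf := find_cons_ne c 'b' rest hb hr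
        rw [hgo, ih, hf]
        have h1 : ¬ PySem.Chars.find rest ['b'] = -1 := by omega
        have h2 : ¬ PySem.Chars.find rest ['b'] + 1 = -1 := by omega
        have h3 : (PySem.Chars.find rest ['b'] + 1).toNat
            = (PySem.Chars.find rest ['b']).toNat + 1 := by omega
        simp [h1, h2, h3]
      case pos =>
        have hf := find_cons_ne_none c 'b' rest hb hneg
        rw [hgo, ih, hf, hneg]
        simp

-- membership scan: Chars.isIn with a singleton pattern is list membership
theorem isIn_singleton (a : Char) (l : List Char) :
    PySem.Chars.isIn [a] l = l.contains a := by
  rw [Bool.eq_iff_iff, PySem.Chars.isIn_iff_infix, List.singleton_infix_iff]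
  simp

-- ===== VERDICT (by name: the statement is the Claim_ definition above) =====
theorem checkString_spec : Claim_equal_checkString := by
  intro s _
  unfold Spec_checkString checkString checkString_alt
  rw [checkGo_eq_alt]
  have hb : ("b" : String).toList = ['b'] := by decide
  have ha : ("a" : String).toList = ['a'] := by decide
  rw [PySem.Str.find_eq, hb]
  by_cases h : PySem.Chars.find s.toList ['b'] = -1
  · simp [h]
  · have hnn : 0 ≤ PySem.Chars.find s.toList ['b'] := by
      have := PySem.Chars.neg_one_le_find s.toList ['b']; omega
    simp only [h, if_false]
    rw [PySem.Str.isIn_eq, ha]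
    have hs : (PySem.Str.slice s (some (PySem.Chars.find s.toList ['b'])) none).toList
        = s.toList.drop (PySem.Chars.find s.toList ['b']).toNat := by
      simp [PySem.Str.slice, PySem.List.slice_from _ hnn]
    rw [hs, isIn_singleton]
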